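-- pv_equiv track=rewrite | github.com/pedropmedina/python-bootcamp | games/bagles.py | get_clues
-- ===== SOURCE A (Python) =====
-- def get_clues(guess, secret_num):
--     if guess == secret_num:
--         return "You got it!"
--
--     clues = []
--     for i in range(len(guess)):
--         if guess[i] == secret_num[i]:
--             clues.append("Fermi")
--         elif guess[i] in secret_num:
--             clues.append("Pico")
--
--     if len(clues) == 0:
--         return "Bagles"
--
--     clues.sort()
--     return " ".join(clues)
-- ===== SOURCE B (Python) =====
-- def get_clues(guess, secret_num):
--     if guess == secret_num:
--         return "You got it!"
--
--     secret_set = set(secret_num)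
--     fermi = sum(g == s for g, s in zip(guess, secret_num))
--     present = sum(g in secret_set for g in guess)
--     clues = ["Fermi"] * fermi + ["Pico"] * (present - fermi)
--     return " ".join(clues) if clues else "Bagles"
-- ===== Notes on version B (the rewrite author's own statement) =====
-- stated objective: alternative
-- what changed: B has no positional clue loop at all: it computes fermi as the number of equal pairs in zip(guess, secret_num), counts how many guess characters occur in set(secret_num) in a second independent pass, derives pico by subtraction (present - fermi, valid because every position match is also a membership hit), and builds the already-sorted output directly as ['Fermi']*fermi + ['Pico']*pico instead of appending per branch and sorting.
import Mathlib
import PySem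

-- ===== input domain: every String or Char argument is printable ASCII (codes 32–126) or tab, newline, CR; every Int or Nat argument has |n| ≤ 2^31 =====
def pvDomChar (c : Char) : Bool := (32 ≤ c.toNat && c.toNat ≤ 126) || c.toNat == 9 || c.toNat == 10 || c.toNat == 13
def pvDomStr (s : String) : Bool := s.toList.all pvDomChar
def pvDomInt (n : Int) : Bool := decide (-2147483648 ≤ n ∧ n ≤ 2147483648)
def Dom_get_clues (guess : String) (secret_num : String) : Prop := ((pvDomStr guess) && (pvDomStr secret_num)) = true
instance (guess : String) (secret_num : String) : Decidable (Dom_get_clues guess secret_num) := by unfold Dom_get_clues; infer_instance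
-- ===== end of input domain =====

-- B drops the positional clue loop: fermi = equal pairs of zip(guess, secret), present = guess chars in
-- set(secret), pico = present - fermi, output built already sorted; objective: alternative (no sort, no branchy loop).

-- ===== PORT A =====
-- loop body of A: append "Fermi"/"Pico" to the clue list (index access via pyGet?; none = IndexError, excluded by Pre_)
def stepA (g s : List Char) (clues : List String) (i : Int) : List String :=
  match PySem.List.pyGet? g i, PySem.List.pyGet? s i with
  | some gc, some sc =>
      if gc == sc then clues ++ ["Fermi"]
      else if PySem.Chars.isIn [gc] s then clues ++ ["Pico"]
      else clues
  | _, _ => clues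

def get_clues (guess : String) (secret_num : String) : String :=
  if guess == secret_num then "You got it!" else
  let g := guess.toList
  let s := secret_num.toList
  let clues := (PySem.List.pyRange 0 g.length 1).foldl (stepA g s) ([] : List String)
  if clues.length == 0 then "Bagles"
  else PySem.Str.join " " (PySem.List.sorted clues (fun x => x) false)

-- ===== PORT B =====
def get_clues_alt (guess : String) (secret_num : String) : String :=
  if guess == secret_num then "You got it!" else
  let g := guess.toList
  let s := secret_num.toList
  let secretSet : PySem.Set Char := PySem.Set.ofList s
  let fermi := (g.zip s).foldl (fun a p => a + (if p.1 == p.2 then (1 : Nat) else 0)) 0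
  let present := g.foldl (fun a c => a + (if PySem.Set.contains secretSet c then (1 : Nat) else 0)) 0
  let clues := List.replicate fermi "Fermi" ++ List.replicate (present - fermi) "Pico"
  if clues ≠ [] then PySem.Str.join " " clues else "Bagles"

-- ===== PRECONDITION & SPEC =====
-- Pre_ excludes only the inputs where the Python A raises IndexError: an unequal guess longer
-- than secret_num (the loop reads secret_num[i] for i up to len(guess)-1).
def Pre_get_clues (guess : String) (secret_num : String) : Prop :=
  guess = secret_num ∨ guess.toList.length ≤ secret_num.toList.length
instance (guess : String) (secret_num : String) : Decidable (Pre_get_clues guess secret_num) := by unfold Pre_get_clues; infer_instance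
def pvWitness_get_clues : String × String := ("123", "143")

def Spec_get_clues (guess : String) (secret_num : String) (out : String) : Prop := out = get_clues_alt guess secret_num
instance (guess : String) (secret_num : String) (out : String) : Decidable (Spec_get_clues guess secret_num out) := by unfold Spec_get_clues; infer_instance

-- ===== CLAIM (what is proved, stated in full; the proofs are below) =====
def Claim_equal_get_clues : Prop := ∀ (guess : String) (secret_num : String), Dom_get_clues guess secret_num → Pre_get_clues guess secret_num → Spec_get_clues guess secret_num (get_clues guess secret_num)

-- ===== LEMMAS AND PROOFS =====

-- A's loop rewritten over pairs: the same branch structure, consumed pair by pair (proof device, not a port)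
def stepZ (s : List Char) (clues : List String) (p : Char × Char) : List String :=
  if p.1 == p.2 then clues ++ ["Fermi"]
  else if PySem.Chars.isIn [p.1] s then clues ++ ["Pico"]
  else clues

-- every element the A-loop ever appends is "Fermi" or "Pico"
lemma foldA_mem (g s : List Char) : ∀ (L : List Int) (acc : List String),
    (∀ x ∈ acc, x = "Fermi" ∨ x = "Pico") →
    ∀ x ∈ L.foldl (stepA g s) acc, x = "Fermi" ∨ x = "Pico" := by
  intro L
  induction L with
  | nil => intro acc h; simpa using h
  | cons i L ih =>
      intro acc h
      simp only [List.foldl_cons]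
      apply ih
      intro x hx
      unfold stepA at hx
      rcases hg : PySem.List.pyGet? g i with _ | gc <;>
        rcases hs : PySem.List.pyGet? s i with _ | sc <;>
        rw [hg, hs] at hx
      case none.none | none.some | some.none => exact h x hx
      case some.some =>
        dsimp only at hx
        split_ifs at hx with h1 h2
        · rcases List.mem_append.mp hx with hx | hx
          · exact h x hx
          · left; simpa using hx
        · rcases List.mem_append.mp hx with hx | hx
          · exact h x hx
          · right; simpa using hx
        · exact h x hx

-- A's index fold over range(len(guess)) is the pair fold over zip(guess, secret) (needs len g ≤ len s)
lemma zipify (g s : List Char) (hlen : g.length ≤ s.length) :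
    ∀ (k : Nat), k ≤ g.length → ∀ (acc : List String),
    (PySem.List.pyRange (k : Int) (g.length : Int) 1).foldl (stepA g s) acc
      = (((g.drop k).zip (s.drop k))).foldl (stepZ s) acc := by
  have main : ∀ (n k : Nat), g.length - k ≤ n → k ≤ g.length → ∀ (acc : List String),
      (PySem.List.pyRange (k : Int) (g.length : Int) 1).foldl (stepA g s) acc
        = (((g.drop k).zip (s.drop k))).foldl (stepZ s) acc := by
    intro n
    induction n with
    | zero =>
        intro k hle hk acc
        have hk' : k = g.length := by omega
        subst hk'
        rw [PySem.List.pyRange_one_eq_nil le_rfl, List.drop_length]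
        simp
    | succ n ih =>
        intro k hle hk acc
        by_cases hk2 : k = g.length
        · subst hk2
          rw [PySem.List.pyRange_one_eq_nil le_rfl, List.drop_length]
          simp
        · have hklt : k < g.length := lt_of_le_of_ne hk hk2
          have hslt : k < s.length := lt_of_lt_of_le hklt hlen
          rw [PySem.List.pyRange_one_cons (by exact_mod_cast hklt)]
          simp only [List.foldl_cons]
          have hcast : ((k : Int) + 1) = (((k + 1 : Nat)) : Int) := by push_cast; ring
          have hstep : stepA g s acc (k : Int) = stepZ s acc (g[k], s[k]) := by
            unfold stepA stepZ
            rw [PySem.List.pyGet?_natCast, PySem.List.pyGet?_natCast,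
              List.getElem?_eq_getElem hklt, List.getElem?_eq_getElem hslt]
          rw [hstep, hcast, List.drop_eq_getElem_cons hklt, List.drop_eq_getElem_cons hslt]
          simp only [List.zip_cons_cons, List.foldl_cons]
          exact ih (k + 1) (by omega) (by omega) _
  exact fun k hk acc => main (g.length - k) k le_rfl hk acc

-- counts of the pair fold
lemma countsZ (s : List Char) : ∀ (L : List (Char × Char)) (acc : List String),
    (L.foldl (stepZ s) acc).count "Fermi"
        = acc.count "Fermi" + L.countP (fun p => p.1 == p.2)
    ∧ (L.foldl (stepZ s) acc).count "Pico"
        = acc.count "Pico" + L.countP (fun p => !(p.1 == p.2) && PySem.Chars.isIn [p.1] s) := by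
  intro L
  induction L with
  | nil => intro acc; simp
  | cons p L ih =>
      intro acc
      simp only [List.foldl_cons, List.countP_cons]
      by_cases h1 : p.1 = p.2
      · have hstep : stepZ s acc p = acc ++ ["Fermi"] := by simp [stepZ, h1]
        rw [hstep]
        rcases ih (acc ++ ["Fermi"]) with ⟨hF, hP⟩
        rw [hF, hP]
        simp [List.count_append, h1]
        omega
      · by_cases h2 : PySem.Chars.isIn [p.1] s = true
        · have hstep : stepZ s acc p = acc ++ ["Pico"] := by simp [stepZ, h1, h2]
          rw [hstep]
          rcases ih (acc ++ ["Pico"]) with ⟨hF, hP⟩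
          rw [hF, hP]
          simp [List.count_append, h1, h2]
          omega
        · have hstep : stepZ s acc p = acc := by
            simp [stepZ, h1, Bool.not_eq_true _ ▸ h2]
          rw [hstep]
          rcases ih acc with ⟨hF, hP⟩
          rw [hF, hP]
          simp [h1, Bool.eq_false_iff.mpr h2]

-- a list of only "Fermi"/"Pico" entries has length = count "Fermi" + count "Pico"
lemma length_eq_counts : ∀ (l : List String),
    (∀ x ∈ l, x = "Fermi" ∨ x = "Pico") → l.length = l.count "Fermi" + l.count "Pico" := by
  intro l
  induction l with
  | nil => intro _; rfl
  | cons a l ih =>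
      intro h
      have ha := h a (by simp)
      have hl := ih (fun x hx => h x (by simp [hx]))
      rcases ha with ha | ha <;> subst ha <;>
        simp [hl] <;> omega

-- sorting a list of only "Fermi"/"Pico" entries yields all Fermis then all Picos
lemma sorted_fp (l : List String) (h : ∀ x ∈ l, x = "Fermi" ∨ x = "Pico") :
    PySem.List.sorted l (fun x => x) false
      = List.replicate (l.count "Fermi") "Fermi" ++ List.replicate (l.count "Pico") "Pico" := by
  apply PySem.List.sorted_id_eq_of_perm_of_pairwise
  · rw [List.perm_iff_count]
    intro a
    by_cases hF : a = "Fermi"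
    · subst hF; simp [List.count_append, List.count_replicate]
    · by_cases hP : a = "Pico"
      · subst hP; simp [List.count_append, List.count_replicate]
      · have : a ∉ l := fun hm => by rcases h a hm with h' | h' <;> simp_all
        simp only [List.count_append, List.count_replicate, List.count_eq_zero.mpr this, beq_iff_eq]
        rw [if_neg (fun h' => hF h'.symm), if_neg (fun h' => hP h'.symm)]
  · apply List.pairwise_append.mpr
    refine ⟨?_, ?_, ?_⟩
    · exact List.pairwise_replicate.mpr (Or.inr (le_refl _))
    · exact List.pairwise_replicate.mpr (Or.inr (le_refl _))
    · intro a ha b hb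
      rw [List.eq_of_mem_replicate ha, List.eq_of_mem_replicate hb]
      exact le_of_lt (by rw [String.lt_iff_toList_lt]; decide)

-- singleton substring membership is character membership
lemma isIn_singleton (c : Char) (s : List Char) :
    PySem.Chars.isIn [c] s = true ↔ c ∈ s := by
  rw [PySem.Chars.isIn_iff_infix]
  exact List.singleton_infix_iff c s

-- on pairs whose second component lies in s: membership count = equal count + (unequal-and-member) count
lemma countP_split (s : List Char) : ∀ (L : List (Char × Char)),
    (∀ p ∈ L, p.2 ∈ s) →
    L.countP (fun p => decide (p.1 ∈ s))
      = L.countP (fun p => p.1 == p.2)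
        + L.countP (fun p => !(p.1 == p.2) && PySem.Chars.isIn [p.1] s) := by
  intro L
  induction L with
  | nil => intro _; simp
  | cons p L ih =>
      intro h
      have h2 : p.2 ∈ s := h p (by simp)
      have hL := ih (fun q hq => h q (by simp [hq]))
      simp only [List.countP_cons]
      by_cases he : p.1 = p.2
      · simp [he, h2, hL]; omega
      · by_cases hm : p.1 ∈ s
        · simp [he, hm, (isIn_singleton p.1 s).mpr hm, hL]; omega
        · have : PySem.Chars.isIn [p.1] s = false := by
            rcases hb : PySem.Chars.isIn [p.1] s with _ | _
            · rfl
            · exact absurd ((isIn_singleton p.1 s).mp hb) hm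
          simp [he, hm, this, hL]

-- ===== VERDICT (by name: the statement is the Claim_ definition above) =====
theorem get_clues_spec : Claim_equal_get_clues := by
  intro guess secret_num _ hpre
  unfold Spec_get_clues get_clues get_clues_alt
  by_cases heq : guess == secret_num
  · simp [heq]
  · simp only [heq, if_false, Bool.false_eq_true]
    set g := guess.toList with hg
    set s := secret_num.toList with hs
    have hne : ¬ guess = secret_num := by simpa using heq
    have hlen : g.length ≤ s.length := by
      rcases hpre with h | h
      · exact absurd h hne
      · exact h
    set L := PySem.List.pyRange 0 (g.length : Int) 1 with hL
    set clues := L.foldl (stepA g s) ([] : List String) with hclues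
    have hmem := foldA_mem g s L [] (by simp)
    have hzip : clues = (g.zip s).foldl (stepZ s) [] := by
      have h0 := zipify g s hlen 0 (Nat.zero_le _) []
      simpa using h0
    obtain ⟨hF, hP⟩ := countsZ s (g.zip s) ([] : List String)
    have hcF : clues.count "Fermi" = (g.zip s).countP (fun p => p.1 == p.2) := by
      rw [hzip, hF]; simp
    have hcP : clues.count "Pico"
        = (g.zip s).countP (fun p => !(p.1 == p.2) && PySem.Chars.isIn [p.1] s) := by
      rw [hzip, hP]; simp
    have hfermi : (g.zip s).foldl (fun a p => a + (if p.1 == p.2 then (1 : Nat) else 0)) 0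
        = (g.zip s).countP (fun p => p.1 == p.2) := by
      simp [PySem.List.foldl_add_nat, PySem.List.sum_map_ite_one_zero_nat']
      exact List.countP_congr (fun x _ => by simp)
    have hcontains : ∀ c, PySem.Set.contains (PySem.Set.ofList s) c = decide (c ∈ s) :=
      fun c => by simp [pysem]
    have hmap : (g.zip s).map Prod.fst = g := List.map_fst_zip hlen
    have hpresent : g.foldl (fun a c => a + (if PySem.Set.contains (PySem.Set.ofList s) c then (1 : Nat) else 0)) 0
        = (g.zip s).countP (fun p => decide (p.1 ∈ s)) := by
      calc g.foldl (fun a c => a + (if PySem.Set.contains (PySem.Set.ofList s) c then (1 : Nat) else 0)) 0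
          = g.countP (fun c => decide (c ∈ s)) := by
            simp only [hcontains]
            simp [PySem.List.foldl_add_nat, PySem.List.sum_map_ite_one_zero_nat']
        _ = ((g.zip s).map Prod.fst).countP (fun c => decide (c ∈ s)) := by rw [hmap]
        _ = (g.zip s).countP (fun p => decide (p.1 ∈ s)) := by rw [List.countP_map]; rfl
    have hsplit := countP_split s (g.zip s) (fun p hp => (List.of_mem_zip hp).2)
    have hlen2 := length_eq_counts clues hmem
    rw [sorted_fp clues hmem, hfermi, hpresent, hsplit, hcF, hcP]
    set cF := (g.zip s).countP (fun p => p.1 == p.2) with hcFdef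
    set cP := (g.zip s).countP (fun p => !(p.1 == p.2) && PySem.Chars.isIn [p.1] s) with hcPdef
    have hsub : cF + cP - cF = cP := by omega
    rw [hsub]
    by_cases hz : cF + cP = 0
    · have h1 : cF = 0 := by omega
      have h2 : cP = 0 := by omega
      have h3 : clues.length = 0 := by omega
      simp [h1, h2, h3]
    · have h3 : ¬ clues.length = 0 := by omega
      have h4 : List.replicate cF "Fermi" ++ List.replicate cP "Pico" ≠ [] := by
        simp only [ne_eq, List.append_eq_nil_iff, List.replicate_eq_nil_iff]
        omega
      simp [h3, h4]
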